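-- pv_equiv track=rewrite | github.com/Sanielia/DiamentBitMatura | ciagi_zadanie/2.py | longest_coherent_prime_subsequence
-- ===== SOURCE A (Python) =====
-- def is_prime(number: int) -> bool:
--     if number == 2:
--         return True
--     if number % 2 == 0 or number < 1:
--         return False
--
--     d = 3
--     while d * d <= number:
--         if number % d == 0:
--             return False
--         d += 2
--
--     return True
--
-- def longest_coherent_prime_subsequence(sequence: list[int]) -> list[int]:
--     start = 0
--     end = 0
--     current_start = 0
--     length = len(sequence)
--     if length < 2:
--         return sequence
--
--     for i, number in enumerate(sequence):
--         if is_prime(number):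
--             continue
--         if  end - start >= i - current_start:
--             current_start = i + 1
--             continue
--         start = current_start
--         end = i
--         current_start = i + 1
--
--     if end - start < length - current_start:
--         start = current_start
--         end = length
--
--     return sequence[start:end]
-- ===== SOURCE B (Python) =====
-- def is_prime(number: int) -> bool:
--     if number == 2:
--         return True
--     if number % 2 == 0 or number < 1:
--         return False
--
--     d = 3
--     while d * d <= number:
--         if number % d == 0:
--             return False
--         d += 2
--
--     return True
--
-- def longest_coherent_prime_subsequence(sequence: list[int]) -> list[int]:
--     if len(sequence) < 2:
--         return sequence
--     best = []
--     cur = []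
--     for x in sequence:
--         if is_prime(x):
--             cur.append(x)
--             if len(cur) > len(best):
--                 best = cur
--         else:
--             cur = []
--     return best
-- ===== Notes on version B (the rewrite author's own statement) =====
-- stated objective: simpler
-- what changed: B builds the maximal prime runs directly as lists in a single pass, keeping the first longest run seen so far, instead of A's start/end/current_start index bookkeeping with a post-loop fixup and a final slice.
import Mathlib
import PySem

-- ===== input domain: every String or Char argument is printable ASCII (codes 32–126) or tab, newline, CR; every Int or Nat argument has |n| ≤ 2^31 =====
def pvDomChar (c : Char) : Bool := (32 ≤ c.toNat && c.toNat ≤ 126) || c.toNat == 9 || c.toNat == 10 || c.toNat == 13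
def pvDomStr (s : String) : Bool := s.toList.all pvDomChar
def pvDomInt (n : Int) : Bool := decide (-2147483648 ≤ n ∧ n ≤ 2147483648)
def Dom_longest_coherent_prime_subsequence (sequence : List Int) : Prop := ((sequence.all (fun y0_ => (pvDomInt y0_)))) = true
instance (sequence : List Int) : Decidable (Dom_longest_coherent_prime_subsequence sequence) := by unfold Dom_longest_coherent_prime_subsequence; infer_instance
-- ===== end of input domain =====

-- B builds the runs of primes directly as lists in one pass (keeping the first longest run so
-- far), instead of A's index bookkeeping with a post-loop fixup and slicing; objective: simpler.


-- ===== PORT A =====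
-- while d * d <= number: …  (d starts at 3, increases by 2)
def isPrimeLoop (number : Int) (d : Int) : Bool :=
  if h : d * d ≤ number then
    if PySem.Int.mod number d == 0 then false else isPrimeLoop number (d + 2)
  else true
termination_by (number + 1 - d).toNat
decreasing_by
  have hd : d ≤ d * d := by nlinarith [sq_nonneg d, sq_nonneg (d - 1)]
  omega

def is_prime (number : Int) : Bool :=
  if number == 2 then true
  else if PySem.Int.mod number 2 == 0 || number < 1 then false
  else isPrimeLoop number 3

-- the body of A's for-loop over enumerate(sequence); state = (start, end, current_start)
def pvStepA (st : Int × Int × Int) (p : Int × Int) : Int × Int × Int :=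
  if is_prime p.2 then st
  else if st.2.1 - st.1 ≥ p.1 - st.2.2 then (st.1, st.2.1, p.1 + 1)
  else (st.2.2, p.1, p.1 + 1)

def longest_coherent_prime_subsequence (sequence : List Int) : List Int :=
  let length : Int := sequence.length
  if length < 2 then sequence
  else
    let st := (PySem.List.enumerate sequence 0).foldl pvStepA (0, 0, 0)
    if st.2.1 - st.1 < length - st.2.2 then
      PySem.List.slice sequence (some st.2.2) (some length)
    else
      PySem.List.slice sequence (some st.1) (some st.2.1)

-- ===== PORT B =====
-- the body of B's loop; state = (best, cur)
def pvStepB (st : List Int × List Int) (x : Int) : List Int × List Int :=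
  if is_prime x then
    let cur := st.2 ++ [x]
    (if cur.length > st.1.length then cur else st.1, cur)
  else (st.1, [])

def longest_coherent_prime_subsequence_alt (sequence : List Int) : List Int :=
  if sequence.length < 2 then sequence
  else (sequence.foldl pvStepB ([], [])).1

-- ===== PRECONDITION & SPEC =====
def Spec_longest_coherent_prime_subsequence (sequence : List Int) (out : List Int) : Prop := out = longest_coherent_prime_subsequence_alt sequence
instance (sequence : List Int) (out : List Int) : Decidable (Spec_longest_coherent_prime_subsequence sequence out) := by unfold Spec_longest_coherent_prime_subsequence; infer_instance

-- ===== CLAIM (what is proved, stated in full; the proofs are below) =====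
def Claim_equal_longest_coherent_prime_subsequence : Prop := ∀ (sequence : List Int), Dom_longest_coherent_prime_subsequence sequence → Spec_longest_coherent_prime_subsequence sequence (longest_coherent_prime_subsequence sequence)

-- ===== LEMMAS AND PROOFS =====

-- loop invariant relating A's index state after processing prefix p to B's list state
def pvInv (p : List Int) (stA : Int × Int × Int) (stB : List Int × List Int) : Prop :=
  ∃ s e c : Nat, stA = ((s : Int), (e : Int), (c : Int)) ∧ s ≤ e ∧ e ≤ c ∧ c ≤ p.length ∧
    stB.2 = p.drop c ∧
    stB.1 = if e - s < p.length - c then p.drop c else (p.take e).drop s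

lemma pvInv_step (p : List Int) (x : Int) (stA : Int × Int × Int) (stB : List Int × List Int)
    (h : pvInv p stA stB) :
    pvInv (p ++ [x]) (pvStepA stA ((p.length : Int), x)) (pvStepB stB x) := by
  obtain ⟨s, e, c, hA, hse, hec, hcp, hcur, hbest⟩ := h
  have hdrop : (p ++ [x]).drop c = p.drop c ++ [x] := List.drop_append_of_le_length hcp
  have htake : ∀ k : Nat, k ≤ p.length → (p ++ [x]).take k = p.take k := by
    intro k hk; rw [List.take_append_of_le_length hk]
  have hlcur : (p.drop c).length = p.length - c := by simp
  have hlcom : ((p.take e).drop s).length = e - s := by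
    simp; omega
  simp only [pvStepA, pvStepB, hA]
  by_cases hp : is_prime x = true
  · -- prime: A unchanged, B extends cur
    simp only [hp, if_true]
    refine ⟨s, e, c, rfl, hse, hec, by simp; omega, ?_, ?_⟩
    · simp only [hcur, hdrop]
    · simp only [hcur, hbest, hdrop, htake e (le_trans hec hcp)]
      by_cases h1 : e - s < p.length - c
      · simp only [if_pos h1]
        have : (p.drop c ++ [x]).length > (p.drop c).length := by simp
        rw [if_pos this, if_pos (by simp [List.length_append]; omega)]
      · simp only [if_neg h1]
        have hL1 : (p.drop c ++ [x]).length = p.length - c + 1 := by simp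
        have hL2 : (p ++ [x]).length = p.length + 1 := by simp
        by_cases h2 : e - s < p.length + 1 - c
        · rw [if_pos (by rw [hL1, hlcom]; omega), if_pos (by rw [hL2]; omega)]
        · rw [if_neg (by rw [hL1, hlcom]; omega), if_neg (by rw [hL2]; omega)]
  · -- non-prime: B resets cur; A compares and maybe commits
    simp only [hp, Bool.false_eq_true, if_false]
    by_cases hge : (e : Int) - (s : Int) ≥ (p.length : Int) - (c : Int)
    · simp only [if_pos hge]
      refine ⟨s, e, p.length + 1, by push_cast; ring_nf, hse, by omega, by simp, by simp, ?_⟩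
      rw [if_neg (by simp), htake e (le_trans hec hcp), hbest,
          if_neg (by omega)]
    · simp only [if_neg hge]
      refine ⟨c, p.length, p.length + 1, by push_cast; ring_nf, hcp, by omega, by simp,
        by simp, ?_⟩
      rw [if_neg (by simp), htake p.length le_rfl, List.take_length, hbest,
          if_pos (by omega)]

lemma pvInv_fold : ∀ (r p : List Int) (stA : Int × Int × Int) (stB : List Int × List Int),
    pvInv p stA stB →
    pvInv (p ++ r) ((PySem.List.enumerate r (p.length : Int)).foldl pvStepA stA)
      (r.foldl pvStepB stB) := by
  intro r
  induction r with
  | nil => intro p stA stB h; simpa [PySem.List.enumerate_nil] using h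
  | cons x r ih =>
    intro p stA stB h
    rw [PySem.List.enumerate_cons]
    have h' := pvInv_step p x stA stB h
    have := ih (p ++ [x]) (pvStepA stA ((p.length : Int), x)) (pvStepB stB x) h'
    simpa [List.append_assoc] using this

theorem longest_coherent_prime_subsequence_spec : Claim_equal_longest_coherent_prime_subsequence := by
  intro sequence _
  unfold Spec_longest_coherent_prime_subsequence
  unfold longest_coherent_prime_subsequence longest_coherent_prime_subsequence_alt
  by_cases hlen : (sequence.length : Int) < 2
  · simp only [hlen, if_pos, if_pos (by exact_mod_cast hlen : sequence.length < 2)]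
  · have hlen' : ¬ sequence.length < 2 := by exact_mod_cast hlen
    simp only [hlen, hlen', if_false]
    have h0 : pvInv ([] : List Int) (0, 0, 0) (([] : List Int), ([] : List Int)) := by
      exact ⟨0, 0, 0, rfl, le_rfl, le_rfl, by simp, by simp, by simp⟩
    have h := pvInv_fold sequence [] (0, 0, 0) ([], []) h0
    simp only [List.nil_append, List.length_nil, Nat.cast_zero] at h
    obtain ⟨s, e, c, hA, hse, hec, hcp, hcur, hbest⟩ := h
    rw [hA]
    by_cases hcond : (e : Int) - (s : Int) < (sequence.length : Int) - (c : Int)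
    · simp only [hcond, if_pos]
      rw [PySem.List.slice_natCast, hbest, if_pos (by omega)]
      have : (sequence.drop c).length = sequence.length - c := by simp
      rw [List.take_of_length_le (by omega)]
    · simp only [hcond, if_false]
      rw [PySem.List.slice_natCast, hbest, if_neg (by omega)]
      rw [List.drop_take]
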